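-- pv_equiv track=rewrite | github.com/lemontrr/Abox_search | _5_pair_to_imp.py | make_lat
-- ===== SOURCE A (Python) =====
-- def make_lat(S,n,m):
--     lat = [[n for i in range(m)]for j in range(n)]
--     for i in range(n):
--         for j in range(m):
--             for x in range(n):
--                 lat[i][j] -= bin((x&i)^(S[x]&j)).count('1')%2
--                 lat[i][j] -= bin((x&i)^(S[x]&j)).count('1')%2
--     return lat
-- ===== SOURCE B (Python) =====
-- def make_lat(S, n, m):
--     # lat[i][j] = sum_x (-1)^popcount((x&i)^(S[x]&j)).  For each column j we build
--     # the sign vector f_j(x) = (-1)^popcount(S[x]&j), zero-pad it to the next power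
--     # of two p >= n, and run a recursive Fast Walsh-Hadamard transform, whose i-th
--     # entry is exactly sum_x (-1)^popcount(x&i)*f_j(x); rows are read off the columns.
--     def fwht(v):
--         if len(v) == 1:
--             return v
--         h = len(v) // 2
--         a = fwht(v[:h])
--         b = fwht(v[h:])
--         return [s + t for s, t in zip(a, b)] + [s - t for s, t in zip(a, b)]
--     if n <= 0:
--         return []
--     p = 1
--     while p < n:
--         p *= 2
--     cols = []
--     for j in range(m):
--         v = [1 - 2 * ((S[x] & j).bit_count() % 2) for x in range(n)] + [0] * (p - n)
--         cols.append(fwht(v))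
--     return [[cols[j][i] for j in range(m)] for i in range(n)]
-- ===== Notes on version B (the rewrite author's own statement) =====
-- stated objective: faster
-- what changed: Replaces the triple loop over (i,j,x) by a per-column recursive Fast Walsh-Hadamard transform: for each j the sign vector f_j(x)=(-1)^popcount(S[x]&j) is zero-padded to the next power of two and transformed, giving all n entries of the column at once, so the O(n^2*m) scan becomes O(n*m*log n).
import Mathlib
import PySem

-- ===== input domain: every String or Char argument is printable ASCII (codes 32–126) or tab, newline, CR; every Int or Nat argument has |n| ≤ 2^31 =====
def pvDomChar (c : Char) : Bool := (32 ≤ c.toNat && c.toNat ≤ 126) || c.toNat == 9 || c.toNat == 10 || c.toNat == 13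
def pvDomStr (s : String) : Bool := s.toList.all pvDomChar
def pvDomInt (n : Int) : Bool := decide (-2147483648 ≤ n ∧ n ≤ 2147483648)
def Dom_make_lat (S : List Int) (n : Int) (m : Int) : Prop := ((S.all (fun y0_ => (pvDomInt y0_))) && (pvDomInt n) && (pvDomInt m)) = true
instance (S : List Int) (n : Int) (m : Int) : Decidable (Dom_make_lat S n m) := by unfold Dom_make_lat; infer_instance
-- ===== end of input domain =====

-- B replaces A's triple loop by a per-column recursive Fast Walsh–Hadamard transform of the
-- zero-padded sign vector f_j(x) = (-1)^popcount(S[x]&j), whose i-th entry is exactly A's cell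
-- value; objective: faster (O(n^2*m) becomes O(n*m*log n)).

-- ===== PORT A =====
def make_lat (S : List Int) (n : Int) (m : Int) : List (List Int) :=
  (PySem.List.pyRange 0 n 1).map (fun i =>
    (PySem.List.pyRange 0 m 1).map (fun j =>
      (PySem.List.pyRange 0 n 1).foldl (fun acc x =>
        acc - ((PySem.Int.bitCount (PySem.Int.bxor (PySem.Int.band x i)
                  (PySem.Int.band (PySem.List.pyGetD S x 0) j)) % 2 : Nat) : Int)
            - ((PySem.Int.bitCount (PySem.Int.bxor (PySem.Int.band x i)
                  (PySem.Int.band (PySem.List.pyGetD S x 0) j)) % 2 : Nat) : Int)) n))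

-- ===== PORT B =====
-- 1 - 2*(y.bit_count() % 2), the sign (-1)^popcount(y)
def pySign (y : Int) : Int := 1 - 2 * ((PySem.Int.bitCount y % 2 : Nat) : Int)

-- Source B's recursive fwht; its base case 'len(v) == 1' is rendered 'v.length ≤ 1' so the Lean
-- recursion is total (make_lat_alt only ever calls it on vectors of power-of-two length ≥ 1,
-- where the two base cases coincide; Python diverges on []).
def fwht (v : List Int) : List Int :=
  if v.length ≤ 1 then v
  else
    let h := v.length / 2
    let a := fwht (v.take h)
    let b := fwht (v.drop h)
    List.zipWith (· + ·) a b ++ List.zipWith (· - ·) a b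
termination_by v.length
decreasing_by
  · simp [List.length_take]; omega
  · simp [List.length_drop]; omega

-- Source B's 'p = 1; while p < n: p *= 2' loop; the 0 < p hypothesis (true at the call, p = 1)
-- carries the loop's invariant so Lean sees termination.
def grow (n p : Int) (hp : 0 < p) : Int :=
  if p < n then grow n (p * 2) (by omega) else p
termination_by (n - p).toNat
decreasing_by omega

def make_lat_alt (S : List Int) (n : Int) (m : Int) : List (List Int) :=
  if n ≤ 0 then []
  else
  let p := grow n 1 (by norm_num)
  let cols := (PySem.List.pyRange 0 m 1).map (fun j =>
    fwht (((PySem.List.pyRange 0 n 1).map (fun x =>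
        pySign (PySem.Int.band (PySem.List.pyGetD S x 0) j)))
      ++ List.replicate (p - n).toNat 0))
  (PySem.List.pyRange 0 n 1).map (fun i =>
    (PySem.List.pyRange 0 m 1).map (fun j =>
      PySem.List.pyGetD (PySem.List.pyGetD cols j []) i 0))

-- ===== PRECONDITION & SPEC =====
-- Pre_ excludes exactly the inputs on which Python A raises IndexError: S[x] is read for
-- x in range(n) whenever both loops run (n > 0 and m > 0), so S must have at least n elements.
def Pre_make_lat (S : List Int) (n : Int) (m : Int) : Prop := n ≤ (S.length : Int) ∨ m ≤ 0
instance (S : List Int) (n : Int) (m : Int) : Decidable (Pre_make_lat S n m) := by unfold Pre_make_lat; infer_instance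
def pvWitness_make_lat : List Int × Int × Int := ([3, 1], 2, 2)

def Spec_make_lat (S : List Int) (n : Int) (m : Int) (out : List (List Int)) : Prop := out = make_lat_alt S n m
instance (S : List Int) (n : Int) (m : Int) (out : List (List Int)) : Decidable (Spec_make_lat S n m out) := by unfold Spec_make_lat; infer_instance

-- ===== CLAIM (what is proved, stated in full; the proofs are below) =====
def Claim_equal_make_lat : Prop := ∀ (S : List Int) (n : Int) (m : Int), Dom_make_lat S n m → Pre_make_lat S n m → Spec_make_lat S n m (make_lat S n m)

-- ===== LEMMAS AND PROOFS =====

theorem xor_mod2 (m k : Nat) : (m ^^^ k) % 2 = (m % 2 + k % 2) % 2 := by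
  rcases Nat.mod_two_eq_zero_or_one m with h | h <;> rcases Nat.mod_two_eq_zero_or_one k with h2 | h2 <;>
    simp [Nat.xor_mod_two_eq, h, h2] <;> omega

theorem bc_xor_parity (m k : Nat) : PySem.Int.bitCount ((m ^^^ k : Nat) : Int) % 2
    = (PySem.Int.bitCount (m : Int) + PySem.Int.bitCount (k : Int)) % 2 := by
  induction m using Nat.strong_induction_on generalizing k with
  | _ m ih =>
    rcases Nat.eq_zero_or_pos m with hm | hm
    · simp [hm]
    rcases Nat.eq_zero_or_pos k with hk | hk
    · simp [hk]
    rcases Nat.eq_zero_or_pos (m ^^^ k) with hx | hx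
    · have hmk : m = k := Nat.xor_eq_zero_iff.mp hx
      subst hmk
      rw [hx]; simp; omega
    rw [PySem.Int.bitCount_natCast hx, PySem.Int.bitCount_natCast hm, PySem.Int.bitCount_natCast hk,
      Nat.xor_div_two]
    have h1 := ih (m / 2) (by omega) (k / 2)
    have h2 := xor_mod2 m k
    omega

-- the sign is multiplicative across XOR on nonnegative arguments
theorem pySign_mul (a b : Int) (ha : 0 ≤ a) (hb : 0 ≤ b) :
    pySign a * pySign b
      = 1 - 2 * ((PySem.Int.bitCount (PySem.Int.bxor a b) % 2 : Nat) : Int) := by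
  rw [PySem.Int.bxor_of_nonneg ha hb]
  obtain ⟨p, rfl⟩ := Int.eq_ofNat_of_zero_le ha
  obtain ⟨q, rfl⟩ := Int.eq_ofNat_of_zero_le hb
  unfold pySign
  simp only [Int.toNat_natCast]
  have h := bc_xor_parity p q
  rcases Nat.mod_two_eq_zero_or_one (PySem.Int.bitCount (p : Int)) with h1 | h1 <;>
    rcases Nat.mod_two_eq_zero_or_one (PySem.Int.bitCount (q : Int)) with h2 | h2 <;>
      (have hA : PySem.Int.bitCount ((p ^^^ q : Nat) : Int) % 2
          = (PySem.Int.bitCount (p : Int) % 2 + PySem.Int.bitCount (q : Int) % 2) % 2 := by omega) <;>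
      rw [h1, h2] at hA ⊢ <;> rw [hA] <;> norm_num

-- A's inner loop 'acc -= t; acc -= t' is init + sum of -2*t
theorem foldl_sub_twice {β : Type} (l : List β) (g : β → Int) (a : Int) :
    l.foldl (fun acc x => acc - g x - g x) a = a + (l.map (fun x => -2 * g x)).sum := by
  have he : (fun (acc : Int) x => acc - g x - g x) = (fun acc x => acc + (-2 * g x)) := by
    funext acc x; ring
  rw [he, PySem.List.foldl_add]

theorem sum_one_sub {β : Type} (l : List β) (g : β → Int) :
    (l.map (fun x => 1 - 2 * g x)).sum = (l.length : Int) + (l.map (fun x => -2 * g x)).sum := by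
  have he : (fun x => 1 - 2 * g x) = (fun x => (1 : Int) + (-2 * g x)) := by funext x; ring
  rw [he, PySem.List.sum_map_add_int, PySem.List.sum_map_const_int]
  ring

-- ---- Nat bitwise facts about adding a fresh top bit 2^k ----

theorem mod_two_toNat (x : Nat) : x % 2 = (x.testBit 0).toNat := by
  rcases Nat.mod_two_eq_zero_or_one x with h | h <;> simp [Nat.testBit_zero, h]

theorem lor_disj : ∀ a b : Nat, a &&& b = 0 → a ||| b = a + b := by
  intro a
  induction a using Nat.strong_induction_on with
  | _ a ih =>
    intro b h
    rcases Nat.eq_zero_or_pos a with ha | ha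
    · simp [ha]
    have h2 : a / 2 &&& b / 2 = 0 := by
      rw [← Nat.and_div_two, h]
    have ih2 := ih (a / 2) (by omega) (b / 2) h2
    have hb0 : (a.testBit 0 && b.testBit 0) = false := by
      rw [← Nat.testBit_and, h]; exact Nat.zero_testBit 0
    have hOr : (a ||| b) % 2 = a % 2 + b % 2 := by
      rw [mod_two_toNat, mod_two_toNat, mod_two_toNat, Nat.testBit_or]
      cases hA : a.testBit 0 <;> cases hB : b.testBit 0 <;> simp_all
    have hsplit := Nat.div_add_mod (a ||| b) 2
    rw [Nat.or_div_two, ih2] at hsplit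
    have ha2 := Nat.div_add_mod a 2
    have hb2 := Nat.div_add_mod b 2
    omega

theorem pow_and_eq_zero {k x : Nat} (h : x < 2 ^ k) : 2 ^ k &&& x = 0 := by
  rw [Nat.and_comm, Nat.and_two_pow, Nat.testBit_lt_two_pow h]
  simp

theorem two_pow_add_eq_lor {k x : Nat} (h : x < 2 ^ k) : 2 ^ k + x = 2 ^ k ||| x :=
  (lor_disj _ _ (pow_and_eq_zero h)).symm

theorem land_top_left {k x i : Nat} (hx : x < 2 ^ k) (hi : i < 2 ^ k) :
    (2 ^ k + x) &&& i = x &&& i := by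
  rw [two_pow_add_eq_lor hx, Nat.and_or_distrib_right, pow_and_eq_zero hi]
  simp

theorem land_top_both {k x i : Nat} (hx : x < 2 ^ k) (hi : i < 2 ^ k) :
    (2 ^ k + x) &&& (2 ^ k + i) = 2 ^ k + (x &&& i) := by
  rw [two_pow_add_eq_lor hx, two_pow_add_eq_lor hi, Nat.and_or_distrib_right,
    Nat.and_or_distrib_left, Nat.and_or_distrib_left, Nat.and_self,
    pow_and_eq_zero hi, Nat.and_comm x (2 ^ k), pow_and_eq_zero hx,
    two_pow_add_eq_lor (Nat.lt_of_le_of_lt Nat.and_le_left hx)]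
  simp

theorem two_pow_add_eq_xor {k x : Nat} (h : x < 2 ^ k) : 2 ^ k + x = 2 ^ k ^^^ x := by
  rw [two_pow_add_eq_lor h]
  refine Nat.eq_of_testBit_eq fun n => ?_
  rw [Nat.testBit_or, Nat.testBit_xor]
  have h0 : ((2 ^ k).testBit n && x.testBit n) = false := by
    rw [← Nat.testBit_and, pow_and_eq_zero h]; exact Nat.zero_testBit n
  cases hA : (2 ^ k).testBit n <;> cases hB : x.testBit n <;> simp_all

theorem bc_two_pow : ∀ k : Nat, PySem.Int.bitCount ((2 ^ k : Nat) : Int) = 1 := by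
  intro k
  induction k with
  | zero => decide
  | succ k ih =>
    rw [PySem.Int.bitCount_natCast ((by positivity))]
    have h1 : 2 ^ (k + 1) % 2 = 0 := by
      simp [Nat.pow_succ, Nat.mul_mod_left]
    have h2 : 2 ^ (k + 1) / 2 = 2 ^ k := by
      rw [Nat.pow_succ]; exact Nat.mul_div_cancel _ (by norm_num)
    rw [h1, h2, ih]

theorem pySign_top {k y : Nat} (h : y < 2 ^ k) :
    pySign ((2 ^ k + y : Nat) : Int) = - pySign ((y : Nat) : Int) := by
  rw [two_pow_add_eq_xor h]
  unfold pySign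
  have hx := bc_xor_parity (2 ^ k) y
  rw [bc_two_pow k] at hx
  rw [hx]
  rcases Nat.mod_two_eq_zero_or_one (PySem.Int.bitCount ((y : Nat) : Int)) with h1 | h1 <;>
    rw [h1] <;> omega

-- ---- fwht unfolding and correctness ----

theorem fwht_of_big (v : List Int) (h : ¬ v.length ≤ 1) :
    fwht v = List.zipWith (· + ·) (fwht (v.take (v.length / 2))) (fwht (v.drop (v.length / 2)))
      ++ List.zipWith (· - ·) (fwht (v.take (v.length / 2))) (fwht (v.drop (v.length / 2))) := by
  rw [fwht]
  simp only [if_neg h]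

theorem fwht_length : ∀ (k : Nat) (v : List Int), v.length = 2 ^ k → (fwht v).length = 2 ^ k := by
  intro k
  induction k with
  | zero => intro v hv; rw [fwht, if_pos (by omega)]; exact hv
  | succ k ih =>
    intro v hv
    have hbig : ¬ v.length ≤ 1 := by rw [hv]; have := Nat.one_lt_two_pow (n := k+1) (by omega); omega
    have hhalf : v.length / 2 = 2 ^ k := by rw [hv, Nat.pow_succ]; omega
    have hta : (v.take (v.length / 2)).length = 2 ^ k := by
      simp [List.length_take, hv]; rw [Nat.pow_succ]; omega
    have htb : (v.drop (v.length / 2)).length = 2 ^ k := by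
      simp [List.length_drop, hv]; rw [Nat.pow_succ]; omega
    rw [fwht_of_big v hbig]
    simp [List.length_zipWith, ih _ hta, ih _ htb, Nat.pow_succ]
    omega

theorem fwht_getD : ∀ (k : Nat) (v : List Int), v.length = 2 ^ k → ∀ i : Nat, i < 2 ^ k →
    (fwht v).getD i 0
      = ((List.range (2 ^ k)).map (fun x => pySign ((x &&& i : Nat) : Int) * v.getD x 0)).sum := by
  intro k
  induction k with
  | zero =>
    intro v hv i hi
    interval_cases i
    rw [fwht, if_pos (by omega)]
    simp [pySign]
  | succ k ih =>
    intro v hv i hi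
    have hbig : ¬ v.length ≤ 1 := by rw [hv]; have := Nat.one_lt_two_pow (n := k+1) (by omega); omega
    have hhalf : v.length / 2 = 2 ^ k := by rw [hv, Nat.pow_succ]; omega
    have hta : (v.take (v.length / 2)).length = 2 ^ k := by
      simp [List.length_take, hv]; rw [Nat.pow_succ]; omega
    have htb : (v.drop (v.length / 2)).length = 2 ^ k := by
      simp [List.length_drop, hv]; rw [Nat.pow_succ]; omega
    have hla := fwht_length k _ hta
    have hlb := fwht_length k _ htb
    have hsplit : 2 ^ (k + 1) = 2 ^ k + 2 ^ k := by rw [Nat.pow_succ]; omega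
    rw [fwht_of_big v hbig, hsplit, List.range_add, List.map_append, List.sum_append,
      List.map_map]
    -- getD of take/drop in terms of v
    have hGa : ∀ x : Nat, x < 2 ^ k → (v.take (v.length / 2)).getD x 0 = v.getD x 0 := by
      intro x hx
      rw [List.getD_eq_getElem _ _ (by omega), List.getD_eq_getElem _ _ (by omega), List.getElem_take]
    have hGb : ∀ x : Nat, x < 2 ^ k → (v.drop (v.length / 2)).getD x 0 = v.getD (2 ^ k + x) 0 := by
      intro x hx
      rw [List.getD_eq_getElem _ _ (by omega), List.getD_eq_getElem _ _ (by omega), List.getElem_drop]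
      congr 1
      omega
    by_cases hcase : i < 2 ^ k
    · -- first half of the output: sum + sum
      rw [List.getD_append _ _ _ _ (by simp [List.length_zipWith, hla, hlb]; omega),
        List.getD_eq_getElem _ _ (by simp [List.length_zipWith, hla, hlb]; omega),
        List.getElem_zipWith]
      rw [← List.getD_eq_getElem _ 0 (by omega), ← List.getD_eq_getElem _ 0 (by omega),
        ih _ hta i hcase, ih _ htb i hcase]
      have e1 : ((List.range (2 ^ k)).map (fun x => pySign ((x &&& i : Nat) : Int) * v.getD x 0)).sum
          = ((List.range (2 ^ k)).map
              (fun x => pySign ((x &&& i : Nat) : Int) * (v.take (v.length / 2)).getD x 0)).sum := by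
        refine congrArg _ (List.map_congr_left fun x hx => ?_)
        rw [hGa x (List.mem_range.mp hx)]
      have e2 : ((List.range (2 ^ k)).map
          ((fun x => pySign ((x &&& i : Nat) : Int) * v.getD x 0) ∘ (fun x => 2 ^ k + x))).sum
          = ((List.range (2 ^ k)).map
              (fun x => pySign ((x &&& i : Nat) : Int) * (v.drop (v.length / 2)).getD x 0)).sum := by
        refine congrArg _ (List.map_congr_left fun x hx => ?_)
        have hx' := List.mem_range.mp hx
        simp only [Function.comp]
        rw [hGb x hx', land_top_left hx' hcase]
      rw [e1, e2]
    · -- second half: difference with flipped signs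
      obtain ⟨i', rfl⟩ : ∃ i', i = 2 ^ k + i' := ⟨i - 2 ^ k, by omega⟩
      have hi' : i' < 2 ^ k := by omega
      rw [List.getD_append_right _ _ _ _ (by simp [List.length_zipWith, hla, hlb])]
      have hidx : 2 ^ k + i' - (List.zipWith (· + ·) (fwht (v.take (v.length / 2))) (fwht (v.drop (v.length / 2)))).length = i' := by
        simp [List.length_zipWith, hla, hlb]
      rw [hidx, List.getD_eq_getElem _ _ (by simp [List.length_zipWith, hla, hlb]; omega),
        List.getElem_zipWith,
        ← List.getD_eq_getElem _ 0 (by omega), ← List.getD_eq_getElem _ 0 (by omega),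
        ih _ hta i' hi', ih _ htb i' hi']
      have e1 : ((List.range (2 ^ k)).map
          (fun x => pySign ((x &&& (2 ^ k + i') : Nat) : Int) * v.getD x 0)).sum
          = ((List.range (2 ^ k)).map
              (fun x => pySign ((x &&& i' : Nat) : Int) * (v.take (v.length / 2)).getD x 0)).sum := by
        refine congrArg _ (List.map_congr_left fun x hx => ?_)
        have hx' := List.mem_range.mp hx
        rw [hGa x hx', Nat.and_comm x (2 ^ k + i'), land_top_left hi' hx', Nat.and_comm i' x]
      have e2 : ((List.range (2 ^ k)).map
          ((fun x => pySign ((x &&& (2 ^ k + i') : Nat) : Int) * v.getD x 0) ∘ (fun x => 2 ^ k + x))).sum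
          = ((List.range (2 ^ k)).map
              (fun x => - (pySign ((x &&& i' : Nat) : Int) * (v.drop (v.length / 2)).getD x 0))).sum := by
        refine congrArg _ (List.map_congr_left fun x hx => ?_)
        have hx' := List.mem_range.mp hx
        simp only [Function.comp]
        rw [hGb x hx', land_top_both hx' hi', pySign_top (Nat.lt_of_le_of_lt Nat.and_le_left hx')]
        ring
      rw [e1, e2]
      have : ((List.range (2 ^ k)).map
          (fun x => - (pySign ((x &&& i' : Nat) : Int) * (v.drop (v.length / 2)).getD x 0))).sum
          = - ((List.range (2 ^ k)).map
              (fun x => pySign ((x &&& i' : Nat) : Int) * (v.drop (v.length / 2)).getD x 0)).sum := by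
        induction List.range (2 ^ k) with
        | nil => simp
        | cons y ys ihy => simp_all; ring
      rw [this]
      ring

-- ---- grow facts ----

theorem grow_spec (n : Int) : ∀ (p : Int) (hp : 0 < p) (j : Nat), p = ((2 ^ j : Nat) : Int) →
    ∃ k : Nat, grow n p hp = ((2 ^ k : Nat) : Int) ∧ n ≤ grow n p hp := by
  have H : ∀ (f : Nat) (p : Int) (hp : 0 < p), (n - p).toNat ≤ f → ∀ j : Nat,
      p = ((2 ^ j : Nat) : Int) →
      ∃ k : Nat, grow n p hp = ((2 ^ k : Nat) : Int) ∧ n ≤ grow n p hp := by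
    intro f
    induction f with
    | zero =>
      intro p hp hf j hj
      rw [grow, if_neg (by omega)]
      exact ⟨j, hj, by omega⟩
    | succ f ih =>
      intro p hp hf j hj
      rw [grow]
      split_ifs with h
      · exact ih (p * 2) (by omega) (by omega) (j + 1)
          (by rw [hj]; push_cast [Nat.pow_succ]; ring)
      · exact ⟨j, hj, by omega⟩
  exact fun p hp j hj => H (n - p).toNat p hp le_rfl j hj

-- ===== VERDICT =====
theorem make_lat_spec : Claim_equal_make_lat := by
  intro S n m _ _
  unfold Spec_make_lat make_lat make_lat_alt
  dsimp only
  by_cases hneg : n ≤ 0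
  · rw [if_pos hneg, PySem.List.pyRange_one_eq_nil hneg]
    rfl
  rw [if_neg hneg]
  obtain ⟨k, hpk, hnp⟩ := grow_spec n 1 (by norm_num) 0 (by norm_num)
  rw [hpk] at hnp ⊢
  apply List.map_congr_left
  intro i hi
  rw [PySem.List.mem_pyRange_one] at hi
  apply List.map_congr_left
  intro j hj
  rw [PySem.List.mem_pyRange_one] at hj
  have hn0 : 0 < n := by omega
  -- B side: resolve the column lookup and apply fwht correctness
  rw [PySem.List.pyGetD_map_pyRange_of_nonneg _ m j _ hj.1 hj.2]
  have hlenmap : (((PySem.List.pyRange 0 n 1)).map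
      (fun x => pySign (PySem.Int.band (PySem.List.pyGetD S x 0) j))).length = n.toNat := by
    simp [PySem.List.length_pyRange_one]
  have hlenv : ((((PySem.List.pyRange 0 n 1)).map
      (fun x => pySign (PySem.Int.band (PySem.List.pyGetD S x 0) j)))
        ++ List.replicate ((((2 ^ k : Nat) : Int) - n).toNat) 0).length = 2 ^ k := by
    rw [List.length_append, hlenmap, List.length_replicate]
    omega
  have hfl := fwht_length k _ hlenv
  rw [PySem.List.pyGetD_eq_getElem _ 0 hi.1 (by rw [hfl]; omega),
    ← List.getD_eq_getElem _ 0 (by rw [hfl]; omega),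
    fwht_getD k _ hlenv i.toNat (by omega)]
  rw [show List.range (2 ^ k)
        = List.range n.toNat ++ (List.range (2 ^ k - n.toNat)).map (fun x => n.toNat + x) from by
      rw [← List.range_add]; congr 1; omega,
    List.map_append, List.sum_append, List.map_map]
  have hzero : ((List.range (2 ^ k - n.toNat)).map
      ((fun x => pySign ((x &&& i.toNat : Nat) : Int) *
        ((((PySem.List.pyRange 0 n 1)).map
          (fun x => pySign (PySem.Int.band (PySem.List.pyGetD S x 0) j)))
            ++ List.replicate ((((2 ^ k : Nat) : Int) - n).toNat) 0).getD x 0)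
        ∘ (fun x => n.toNat + x))).sum = 0 := by
    apply List.sum_eq_zero
    intro t ht
    rcases List.mem_map.mp ht with ⟨y, hy, rfl⟩
    have hy' := List.mem_range.mp hy
    simp only [Function.comp]
    rw [List.getD_append_right _ _ _ _ (by omega), hlenmap, Nat.add_sub_cancel_left,
      List.getD_replicate (0 : Int) (i := y) (n := ((((2 ^ k : Nat) : Int)) - n).toNat) (by omega)]
    ring
  rw [hzero, add_zero]
  -- A side: the inner loop is a sum of signs
  rw [foldl_sub_twice]
  have hA : ((PySem.List.pyRange 0 n 1).map (fun x =>
      -2 * ((PySem.Int.bitCount (PySem.Int.bxor (PySem.Int.band x i)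
        (PySem.Int.band (PySem.List.pyGetD S x 0) j)) % 2 : Nat) : Int))).sum
      = ((PySem.List.pyRange 0 n 1).map (fun x =>
          1 - 2 * ((PySem.Int.bitCount (PySem.Int.bxor (PySem.Int.band x i)
            (PySem.Int.band (PySem.List.pyGetD S x 0) j)) % 2 : Nat) : Int))).sum
        - (((PySem.List.pyRange 0 n 1).length : Nat) : Int) := by
    rw [sum_one_sub]
    ring
  rw [hA, PySem.List.length_pyRange_one]
  have hcast : (((n - 0).toNat : Nat) : Int) = n := by omega
  rw [hcast]
  have hB : ((List.range n.toNat).map (fun x => pySign ((x &&& i.toNat : Nat) : Int) *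
          ((((PySem.List.pyRange 0 n 1)).map
            (fun x => pySign (PySem.Int.band (PySem.List.pyGetD S x 0) j)))
              ++ List.replicate ((((2 ^ k : Nat) : Int) - n).toNat) 0).getD x 0)).sum
      = ((List.range n.toNat).map (fun x => pySign ((x &&& i.toNat : Nat) : Int) *
          pySign (PySem.Int.band (PySem.List.pyGetD S ((x : Nat) : Int) 0) j))).sum := by
    refine congrArg _ (List.map_congr_left fun x hx => ?_)
    have hx' := List.mem_range.mp hx
    rw [List.getD_append _ _ _ x (by rw [hlenmap]; omega),
      List.getD_eq_getElem _ _ (by rw [hlenmap]; omega),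
      List.getElem_map, PySem.List.getElem_pyRange_one]
    norm_num
  rw [hB]
  have hA2 : ((PySem.List.pyRange 0 n 1).map (fun x =>
      1 - 2 * ((PySem.Int.bitCount (PySem.Int.bxor (PySem.Int.band x i)
        (PySem.Int.band (PySem.List.pyGetD S x 0) j)) % 2 : Nat) : Int))).sum
      = ((List.range n.toNat).map (fun x => pySign ((x &&& i.toNat : Nat) : Int) *
          pySign (PySem.Int.band (PySem.List.pyGetD S ((x : Nat) : Int) 0) j))).sum := by
    rw [PySem.List.pyRange_one 0 n, List.map_map]
    have hnn : (n - 0).toNat = n.toNat := by omega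
    rw [hnn]
    refine congrArg _ (List.map_congr_left fun x hx => ?_)
    simp only [Function.comp, zero_add]
    have hband : ((x &&& i.toNat : Nat) : Int) = PySem.Int.band ((x : Nat) : Int) i := by
      rw [← PySem.Int.band_natCast, Int.toNat_of_nonneg hi.1]
    rw [hband, pySign_mul _ _ (PySem.Int.band_nonneg_of_nonneg_left _ (Int.natCast_nonneg x))
        (by rw [PySem.Int.band_comm]; exact PySem.Int.band_nonneg_of_nonneg_left _ hj.1)]
  rw [hA2]
  ring
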